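-- pv_equiv track=rewrite | github.com/ruthenian8/folklore | folklore_app/search_engine/response_processors.py | differing_ana_field
-- ===== SOURCE A (Python) =====
-- def differing_ana_field(ana1, ana2):
--     """
--     Determine if two analyses with equal number of fields only differ
--     in one field, with the possible exception of the gloss field.
--     If they do, return the name of the field. If they do not differ
--     at all, return empty string. If they have more than one
--     differing fields, return None.
--     """
--     differingField = ''
--     for key in ana1:
--         if key not in ana2:
--             return None
--         if key in ('gloss', 'gloss_index'):
--             continue
--         if ana2[key] != ana1[key]:
--             if len(differingField) > 0:
--                 return None
--             differingField = key
--     return differingField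
-- ===== SOURCE B (Python) =====
-- def differing_ana_field(ana1, ana2):
--     if set(ana1) - set(ana2):
--         return None
--     agree = {k for k, v in ana1.items() & ana2.items()}
--     diffs = set(ana1) - agree - {'gloss', 'gloss_index'}
--     if len(diffs) > 1:
--         return None
--     return diffs.pop() if diffs else ''
-- ===== Notes on version B (the rewrite author's own statement) =====
-- stated objective: alternative
-- what changed: A's single early-exit loop over the keys (missing-key check, gloss skip, diff counting via an empty-string sentinel) is replaced by whole-set algebra: a key-set difference for the presence check, an intersection of the two item sets to get the agreeing keys, set subtraction to get the differing non-gloss fields, and a final cardinality test.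
-- intended difference: When every key of ana1 is in ana2 and the differing non-gloss fields, in key order, are exactly the field named '' followed by one other field, A returns that other field's name (its empty-string sentinel drops the '' diff) while B returns None, the intended value since two fields differ. — e.g. on differing_ana_field([("", "1"), ("a", "1")], [("", "2"), ("a", "2")]): A returns some "a", B returns none
import Mathlib
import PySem

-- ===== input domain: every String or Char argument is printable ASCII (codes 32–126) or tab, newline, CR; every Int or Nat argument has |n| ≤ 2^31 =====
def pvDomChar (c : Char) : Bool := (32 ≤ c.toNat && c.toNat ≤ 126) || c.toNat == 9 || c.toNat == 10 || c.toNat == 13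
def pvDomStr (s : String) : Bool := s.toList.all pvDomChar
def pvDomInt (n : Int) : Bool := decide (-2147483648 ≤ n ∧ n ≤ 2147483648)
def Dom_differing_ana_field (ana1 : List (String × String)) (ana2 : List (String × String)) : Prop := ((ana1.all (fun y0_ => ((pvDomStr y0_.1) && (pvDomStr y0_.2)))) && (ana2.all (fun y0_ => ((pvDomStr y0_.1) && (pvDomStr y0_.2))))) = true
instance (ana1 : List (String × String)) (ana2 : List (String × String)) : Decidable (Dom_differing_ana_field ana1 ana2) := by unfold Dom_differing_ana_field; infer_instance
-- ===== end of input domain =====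

-- B replaces A's early-exit key loop with sentinel accumulator by set algebra on whole
-- key/item sets (key-set difference, item-set intersection, set subtraction, one length test);
-- B intentionally counts a differing field named "" (see D_ below), which A's empty-string
-- sentinel silently drops.

-- ===== PORT A =====
-- key in ('gloss', 'gloss_index')
def pvIsGloss (k : String) : Bool := ["gloss", "gloss_index"].contains k

-- the 'for key in ana1' loop with its early returns; acc = differingField
def pvALoop (d1 d2 : PySem.Dict String String) : List String → String → Option String
  | [], acc => some acc
  | k :: rest, acc =>
    if d2.contains k = false then none          -- if key not in ana2: return None
    else if pvIsGloss k = true then pvALoop d1 d2 rest acc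
    else if d2.get? k ≠ d1.get? k then          -- ana2[key] != ana1[key] (both present here)
      if PySem.Str.len acc > 0 then none        -- len(differingField) > 0
      else pvALoop d1 d2 rest k
    else pvALoop d1 d2 rest acc

def differing_ana_field (ana1 : List (String × String)) (ana2 : List (String × String)) : Option String :=
  pvALoop (PySem.Dict.ofList ana1) (PySem.Dict.ofList ana2) (PySem.Dict.ofList ana1).keys ""

-- ===== PORT B =====
-- agree = {k for k, v in ana1.items() & ana2.items()}; diffs = set(ana1) - agree - {'gloss', 'gloss_index'}
def pvBDiffs (d1 d2 : PySem.Dict String String) : PySem.Set String :=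
  PySem.Set.diff (PySem.Set.diff (PySem.Set.ofList d1.keys)
    (PySem.Set.ofList
      ((PySem.Set.inter (PySem.Set.ofList d1.items) (PySem.Set.ofList d2.items)).map Prod.fst)))
    (PySem.Set.ofList ["gloss", "gloss_index"])

def differing_ana_field_alt (ana1 : List (String × String)) (ana2 : List (String × String)) : Option String :=
  let d1 := PySem.Dict.ofList ana1
  let d2 := PySem.Dict.ofList ana2
  -- if set(ana1) - set(ana2): return None
  if PySem.Set.diff (PySem.Set.ofList d1.keys) (PySem.Set.ofList d2.keys) ≠ [] then none
  else if PySem.Set.len (pvBDiffs d1 d2) > 1 then none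
  else match pvBDiffs d1 d2 with                 -- diffs.pop() if diffs else '' (pop on a singleton)
    | [] => some ""
    | k :: _ => some k

-- ===== PRECONDITION & SPEC =====
-- When every key of ana1 is in ana2 and the differing non-gloss fields, in key order, are exactly
-- the field named "" followed by one other field, A returns that other field's name (its
-- empty-string sentinel drops the "" diff) while B returns None — the intended value, since two
-- fields differ.
def D_differing_ana_field (ana1 : List (String × String)) (ana2 : List (String × String)) : Prop :=
  let d1 := PySem.Dict.ofList ana1
  let d2 := PySem.Dict.ofList ana2
  d1.keys ⊆ d2.keys ∧ ∃ k ∈ d1.keys,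
    d1.keys.filter (fun x => !pvIsGloss x && d1.get? x != d2.get? x) = ["", k]
instance (ana1 : List (String × String)) (ana2 : List (String × String)) : Decidable (D_differing_ana_field ana1 ana2) := by unfold D_differing_ana_field; infer_instance

def Spec_differing_ana_field (ana1 : List (String × String)) (ana2 : List (String × String)) (out : Option String) : Prop := ¬ D_differing_ana_field ana1 ana2 → out = differing_ana_field_alt ana1 ana2
instance (ana1 : List (String × String)) (ana2 : List (String × String)) (out : Option String) : Decidable (Spec_differing_ana_field ana1 ana2 out) := by unfold Spec_differing_ana_field; infer_instance

def pvDiffWitness_differing_ana_field : (List (String × String)) × (List (String × String)) :=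
  ([("", "1"), ("a", "1")], [("", "2"), ("a", "2")])
def pvDiffWitnessOut_differing_ana_field : (Option String) × (Option String) := (some "a", none)

-- ===== CLAIM (what is proved, stated in full; the proofs are below) =====
def Claim_unchanged_differing_ana_field : Prop := ∀ (ana1 : List (String × String)) (ana2 : List (String × String)), Dom_differing_ana_field ana1 ana2 → Spec_differing_ana_field ana1 ana2 (differing_ana_field ana1 ana2)
def Claim_changed_differing_ana_field : Prop := Dom_differing_ana_field (pvDiffWitness_differing_ana_field.1) (pvDiffWitness_differing_ana_field.2) ∧ D_differing_ana_field (pvDiffWitness_differing_ana_field.1) (pvDiffWitness_differing_ana_field.2) ∧ differing_ana_field (pvDiffWitness_differing_ana_field.1) (pvDiffWitness_differing_ana_field.2) = pvDiffWitnessOut_differing_ana_field.1 ∧ differing_ana_field_alt (pvDiffWitness_differing_ana_field.1) (pvDiffWitness_differing_ana_field.2) = pvDiffWitnessOut_differing_ana_field.2 ∧ pvDiffWitnessOut_differing_ana_field.1 ≠ pvDiffWitnessOut_differing_ana_field.2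
def Claim_exact_differing_ana_field : Prop := ∀ (ana1 : List (String × String)) (ana2 : List (String × String)), Dom_differing_ana_field ana1 ana2 → D_differing_ana_field ana1 ana2 → differing_ana_field ana1 ana2 ≠ differing_ana_field_alt ana1 ana2

-- ===== LEMMAS AND PROOFS =====

-- the differing-non-gloss-field predicate both characterisations reduce to
def pvDiffPred (d1 d2 : PySem.Dict String String) (k : String) : Bool :=
  !pvIsGloss k && (d1.get? k != d2.get? k)

-- A's accumulator loop restricted to the differing keys
def pvGRun : String → List String → Option String
  | acc, [] => some acc
  | acc, k :: rest => if PySem.Str.len acc > 0 then none else pvGRun k rest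

lemma pvStr_len_pos (s : String) (h : s ≠ "") : PySem.Str.len s > 0 := by
  have h2 : s.toList ≠ [] := by simpa using h
  have h3 : 0 < s.toList.length := List.length_pos_iff.mpr h2
  simp only [PySem.Str.len]
  omega

lemma pvGRun_cons_empty (k : String) (rest : List String) :
    pvGRun "" (k :: rest) = pvGRun k rest := by
  simp only [pvGRun]
  rw [if_neg]
  simp [PySem.Str.len]

lemma pvGRun_cons_ne (a k : String) (rest : List String) (h : a ≠ "") :
    pvGRun a (k :: rest) = none := by
  simp only [pvGRun]
  rw [if_pos (pvStr_len_pos a h)]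

lemma pvALoop_eq (d1 d2 : PySem.Dict String String) (keys : List String) (acc : String) :
    pvALoop d1 d2 keys acc =
      if keys.all (fun k => d2.contains k) then
        pvGRun acc (keys.filter (pvDiffPred d1 d2))
      else none := by
  induction keys generalizing acc with
  | nil => simp [pvALoop, pvGRun]
  | cons k rest ih =>
    simp only [pvALoop, List.filter_cons, List.all_cons]
    by_cases hc : d2.contains k = true
    · rw [if_neg (by simp [hc]), hc]
      simp only [Bool.true_and]
      by_cases hg : pvIsGloss k = true
      · have hp : pvDiffPred d1 d2 k = false := by
          simp [pvDiffPred, hg]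
        rw [if_pos hg, ih, hp]
        simp
      · rw [if_neg hg]
        by_cases hd : d2.get? k ≠ d1.get? k
        · have hd2 : d1.get? k ≠ d2.get? k := fun h => hd h.symm
          have hp : pvDiffPred d1 d2 k = true := by
            simp only [Bool.not_eq_true] at hg
            simp [pvDiffPred, hg, hd2]
          rw [if_pos hd, hp]
          simp only [if_true]
          by_cases ha : PySem.Str.len acc > 0
          · rw [if_pos ha]
            split
            · simp only [pvGRun]
              rw [if_pos ha]
            · rfl
          · rw [if_neg ha, ih]
            split
            · simp only [pvGRun]
              rw [if_neg ha]
            · rfl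
        · have hd' : d2.get? k = d1.get? k := by simpa using hd
          have hp : pvDiffPred d1 d2 k = false := by
            simp [pvDiffPred, hd']
          rw [if_neg hd, ih, hp]
          simp
    · have hc' : d2.contains k = false := by simpa using hc
      simp [hc']

lemma pvD_iff (ana1 ana2 : List (String × String)) :
    D_differing_ana_field ana1 ana2 ↔
      ((∀ k ∈ (PySem.Dict.ofList ana1).keys, k ∈ (PySem.Dict.ofList ana2).keys) ∧
       ∃ k ∈ (PySem.Dict.ofList ana1).keys,
         (PySem.Dict.ofList ana1).keys.filter
           (pvDiffPred (PySem.Dict.ofList ana1) (PySem.Dict.ofList ana2)) = ["", k]) :=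
  Iff.rfl

lemma pvA_char (ana1 ana2 : List (String × String))
    (hsub : ∀ k ∈ (PySem.Dict.ofList ana1).keys, k ∈ (PySem.Dict.ofList ana2).keys) :
    differing_ana_field ana1 ana2 =
      pvGRun "" ((PySem.Dict.ofList ana1).keys.filter
        (pvDiffPred (PySem.Dict.ofList ana1) (PySem.Dict.ofList ana2))) := by
  unfold differing_ana_field
  rw [pvALoop_eq, if_pos]
  simp only [List.all_eq_true]
  intro k hk
  exact (PySem.Dict.contains_iff_mem_keys _ _).mpr (hsub k hk)

-- membership in B's agree set is agreement of the two lookups (for a key of d1)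
lemma pvAgree_mem (d1 d2 : PySem.Dict String String) (hnd1 : d1.keys.Nodup)
    (hnd2 : d2.keys.Nodup) (k : String) (hk : k ∈ d1.keys) :
    (k ∈ PySem.Set.ofList
        ((PySem.Set.inter (PySem.Set.ofList d1.items) (PySem.Set.ofList d2.items)).map Prod.fst))
      ↔ d1.get? k = d2.get? k := by
  rw [PySem.Set.mem_ofList]
  constructor
  · intro h
    obtain ⟨p, hp, hpk⟩ := List.mem_map.mp h
    have hp' := (PySem.Set.mem_inter _ _ _).mp hp
    rw [PySem.Set.mem_ofList, PySem.Set.mem_ofList] at hp'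
    obtain ⟨k', v⟩ := p
    cases hpk
    rw [PySem.Dict.get?_of_mem_items _ hp'.1 hnd1, PySem.Dict.get?_of_mem_items _ hp'.2 hnd2]
  · intro h
    obtain ⟨v, hv⟩ : ∃ v, d1.get? k = some v := by
      have := PySem.Dict.contains_eq_isSome_get? d1 k
      rw [(PySem.Dict.contains_iff_mem_keys _ _).mpr hk] at this
      exact Option.isSome_iff_exists.mp this.symm
    refine List.mem_map.mpr ⟨(k, v), (PySem.Set.mem_inter _ _ _).mpr ?_, rfl⟩
    rw [PySem.Set.mem_ofList, PySem.Set.mem_ofList]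
    exact ⟨PySem.Dict.mem_items_of_get?_eq_some _ hv,
      PySem.Dict.mem_items_of_get?_eq_some _ (h ▸ hv)⟩

lemma pvB_char (ana1 ana2 : List (String × String))
    (hsub : ∀ k ∈ (PySem.Dict.ofList ana1).keys, k ∈ (PySem.Dict.ofList ana2).keys) :
    differing_ana_field_alt ana1 ana2 =
      (if ((PySem.Dict.ofList ana1).keys.filter
          (pvDiffPred (PySem.Dict.ofList ana1) (PySem.Dict.ofList ana2))).length > 1 then none
       else match (PySem.Dict.ofList ana1).keys.filter
          (pvDiffPred (PySem.Dict.ofList ana1) (PySem.Dict.ofList ana2)) with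
         | [] => some ""
         | k :: _ => some k) := by
  unfold differing_ana_field_alt
  have hnd1 := PySem.Dict.nodup_keys_ofList ana1
  have hnd2 := PySem.Dict.nodup_keys_ofList ana2
  have h1 : PySem.Set.ofList (PySem.Dict.ofList ana1).keys = (PySem.Dict.ofList ana1).keys :=
    PySem.Set.ofList_eq_self_of_nodup _ hnd1
  have hempty : PySem.Set.diff (PySem.Set.ofList (PySem.Dict.ofList ana1).keys)
      (PySem.Set.ofList (PySem.Dict.ofList ana2).keys) = [] := by
    show List.filter _ _ = []
    rw [List.filter_eq_nil_iff]
    intro k hk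
    rw [h1] at hk
    simp only [PySem.Set.contains_eq_listContains, Bool.not_eq_true', Bool.not_eq_false]
    exact List.elem_eq_true_of_mem ((PySem.Set.mem_ofList _ _).mpr (hsub k hk))
  rw [if_neg (by simp [hempty])]
  have hdiffs : pvBDiffs (PySem.Dict.ofList ana1) (PySem.Dict.ofList ana2) =
      (PySem.Dict.ofList ana1).keys.filter
        (pvDiffPred (PySem.Dict.ofList ana1) (PySem.Dict.ofList ana2)) := by
    show List.filter _ (List.filter _ _) = _
    rw [h1, List.filter_filter]
    apply List.filter_congr
    intro k hk
    have hmem := pvAgree_mem (PySem.Dict.ofList ana1) (PySem.Dict.ofList ana2) hnd1 hnd2 k hk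
    have hof : PySem.Set.ofList ["gloss", "gloss_index"] = ["gloss", "gloss_index"] := by decide
    by_cases he : (PySem.Dict.ofList ana1).get? k = (PySem.Dict.ofList ana2).get? k
    · simp [pvDiffPred, pvIsGloss, hof, List.contains_eq_mem, hmem.mpr he, he]
    · have hna : k ∉ PySem.Set.ofList
          ((PySem.Set.inter (PySem.Set.ofList (PySem.Dict.ofList ana1).items)
            (PySem.Set.ofList (PySem.Dict.ofList ana2).items)).map Prod.fst) :=
        fun h => he (hmem.mp h)
      simp [pvDiffPred, pvIsGloss, hof, List.contains_eq_mem, hna, bne_iff_ne, he]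
  rw [hdiffs]
  simp only [PySem.Set.len]
  generalize (PySem.Dict.ofList ana1).keys.filter
    (pvDiffPred (PySem.Dict.ofList ana1) (PySem.Dict.ofList ana2)) = L
  by_cases hl : L.length > 1
  · rw [if_pos (by exact_mod_cast hl), if_pos hl]
  · rw [if_neg (by exact_mod_cast hl), if_neg hl]
    cases L <;> rfl

lemma pvNotSub_none (ana1 ana2 : List (String × String))
    (hsub : ¬ ∀ k ∈ (PySem.Dict.ofList ana1).keys, k ∈ (PySem.Dict.ofList ana2).keys) :
    differing_ana_field ana1 ana2 = none ∧ differing_ana_field_alt ana1 ana2 = none := by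
  push_neg at hsub
  obtain ⟨k, hk, hk2⟩ := hsub
  constructor
  · unfold differing_ana_field
    rw [pvALoop_eq, if_neg]
    simp only [List.all_eq_true, not_forall]
    exact ⟨k, hk, by simp [(PySem.Dict.contains_iff_mem_keys _ _).not.mpr hk2]⟩
  · unfold differing_ana_field_alt
    rw [if_pos]
    intro h
    have : k ∈ PySem.Set.diff (PySem.Set.ofList (PySem.Dict.ofList ana1).keys)
        (PySem.Set.ofList (PySem.Dict.ofList ana2).keys) := by
      rw [PySem.Set.mem_diff, PySem.Set.mem_ofList, PySem.Set.mem_ofList]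
      exact ⟨hk, hk2⟩
    rw [h] at this
    exact absurd this (List.not_mem_nil)

-- ===== VERDICT (by name: the statement is the Claim_ definition above) =====
theorem differing_ana_field_spec : Claim_unchanged_differing_ana_field := by
  intro ana1 ana2 _ hnd
  by_cases hsub : ∀ k ∈ (PySem.Dict.ofList ana1).keys, k ∈ (PySem.Dict.ofList ana2).keys
  · rw [pvA_char ana1 ana2 hsub, pvB_char ana1 ana2 hsub]
    rw [pvD_iff] at hnd
    simp only [not_and] at hnd
    have hnd2 := hnd hsub
    have hnodup : ((PySem.Dict.ofList ana1).keys.filter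
        (pvDiffPred (PySem.Dict.ofList ana1) (PySem.Dict.ofList ana2))).Nodup :=
      (PySem.Dict.nodup_keys_ofList ana1).filter _
    have hsubk : ∀ x ∈ ((PySem.Dict.ofList ana1).keys.filter
        (pvDiffPred (PySem.Dict.ofList ana1) (PySem.Dict.ofList ana2))),
        x ∈ (PySem.Dict.ofList ana1).keys := fun x hx => List.mem_of_mem_filter hx
    generalize hm : (PySem.Dict.ofList ana1).keys.filter
        (pvDiffPred (PySem.Dict.ofList ana1) (PySem.Dict.ofList ana2)) = ds at hnd2 hnodup hsubk ⊢
    match ds with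
    | [] => rfl
    | [k] => simp [pvGRun]
    | k :: m :: t =>
      have hB : (if (k :: m :: t).length > 1 then (none : Option String)
          else match k :: m :: t with | [] => some "" | k :: _ => some k) = none := by
        simp
      rw [hB]
      by_cases hk : k = ""
      · subst hk
        have ht : t ≠ [] := by
          intro h
          subst h
          exact hnd2 ⟨m, hsubk m (by simp), rfl⟩
        match t with
        | [] => exact absurd rfl ht
        | r :: t' =>
          have hm' : m ≠ "" := by
            intro h
            subst h
            simp at hnodup
          rw [pvGRun_cons_empty, pvGRun_cons_empty, pvGRun_cons_ne m r t' hm']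
      · rw [pvGRun_cons_empty, pvGRun_cons_ne k m t hk]
  · obtain ⟨hA, hB⟩ := pvNotSub_none ana1 ana2 hsub
    rw [hA, hB]

theorem differing_ana_field_changed : Claim_changed_differing_ana_field := by
  unfold Claim_changed_differing_ana_field; decide

theorem differing_ana_field_tight : Claim_exact_differing_ana_field := by
  intro ana1 ana2 _ hd
  rw [pvD_iff] at hd
  obtain ⟨hsub, k, _, hds⟩ := hd
  rw [pvA_char ana1 ana2 hsub, pvB_char ana1 ana2 hsub, hds]
  rw [pvGRun_cons_empty, pvGRun_cons_empty]
  simp [pvGRun]
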